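-- pv_equiv track=rewrite | github.com/karthiksuresh181/tranalyze_backend | src/endpoints/futures/futures.py | get_limits
-- ===== SOURCE A (Python) =====
-- def get_limits(open_orders, symbol):
--     stop_price = "NA"
--     limit_price = "NA"
--     for order in open_orders:
--         if(order["symbol"] == symbol):
--             if(order['type'] != "STOP_MARKET"):
--                 limit_price = order["price"]
--             else:
--                 stop_price = order["stopPrice"]
--     return limit_price, stop_price
-- ===== SOURCE B (Python) =====
-- def get_limits(open_orders, symbol):
--     limit_price = "NA"
--     stop_price = "NA"
--     have_limit = False
--     have_stop = False
--     for order in reversed(list(open_orders)):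
--         if order["symbol"] == symbol:
--             if order["type"] != "STOP_MARKET":
--                 if not have_limit:
--                     limit_price = order["price"]
--                     have_limit = True
--             elif not have_stop:
--                 stop_price = order["stopPrice"]
--                 have_stop = True
--             if have_limit and have_stop:
--                 break
--     return limit_price, stop_price
-- ===== Notes on version B (the rewrite author's own statement) =====
-- stated objective: alternative
-- what changed: B scans the orders in reverse with found-flags and breaks as soon as both the limit and the stop price are resolved (first match from the end = A's last-write-wins), instead of A's full forward scan that keeps overwriting.
import Mathlib
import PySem

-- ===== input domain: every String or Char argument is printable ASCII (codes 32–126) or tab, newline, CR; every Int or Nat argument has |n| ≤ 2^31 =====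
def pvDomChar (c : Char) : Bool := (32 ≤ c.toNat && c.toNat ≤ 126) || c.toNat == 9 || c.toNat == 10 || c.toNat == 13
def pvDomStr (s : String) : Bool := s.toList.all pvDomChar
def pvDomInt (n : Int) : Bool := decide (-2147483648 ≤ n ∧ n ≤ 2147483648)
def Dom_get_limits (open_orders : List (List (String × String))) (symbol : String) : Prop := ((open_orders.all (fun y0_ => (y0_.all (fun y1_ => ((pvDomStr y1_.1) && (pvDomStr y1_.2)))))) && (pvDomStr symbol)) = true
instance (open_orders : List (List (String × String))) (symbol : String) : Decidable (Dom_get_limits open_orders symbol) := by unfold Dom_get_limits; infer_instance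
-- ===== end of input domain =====

-- ===== PORT A =====
-- B replaces A's full forward overwrite-scan by a reverse scan with found-flags and an early break (alternative decomposition; return value only).
-- order[k] in Python raises KeyError when k is missing; the port uses getD "" and Pre_ excludes missing keys.
def pvLook (o : List (String × String)) (k : String) : String :=
  (PySem.Dict.mk o).getD k ""

def pvStepA (symbol : String) (ls : String × String) (order : List (String × String)) : String × String :=
  if pvLook order "symbol" = symbol then
    if pvLook order "type" ≠ "STOP_MARKET" then (pvLook order "price", ls.2)
    else (ls.1, pvLook order "stopPrice")
  else ls

def get_limits (open_orders : List (List (String × String))) (symbol : String) : String × String :=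
  open_orders.foldl (pvStepA symbol) ("NA", "NA")

-- ===== PORT B =====
def pvGoB (symbol : String) : List (List (String × String)) → String → String → Bool → Bool → String × String
  | [], l, s, _, _ => (l, s)
  | order :: rest, l, s, hl, hs =>
    if pvLook order "symbol" = symbol then
      if pvLook order "type" ≠ "STOP_MARKET" then
        if !hl then
          let l' := pvLook order "price"
          if hs then (l', s) else pvGoB symbol rest l' s true hs
        else
          if hs then (l, s) else pvGoB symbol rest l s hl hs
      else
        if !hs then
          let s' := pvLook order "stopPrice"
          if hl then (l, s') else pvGoB symbol rest l s' hl true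
        else
          if hl then (l, s) else pvGoB symbol rest l s hl hs
    else pvGoB symbol rest l s hl hs

def get_limits_alt (open_orders : List (List (String × String))) (symbol : String) : String × String :=
  pvGoB symbol open_orders.reverse "NA" "NA" false false

-- ===== PRECONDITION & SPEC =====
-- Pre_ excludes exactly the inputs where Python A raises KeyError: an order missing "symbol", or a
-- matching order missing "type" or the price key its branch reads.
def Pre_get_limits (open_orders : List (List (String × String))) (symbol : String) : Prop :=
  ∀ o ∈ open_orders,
    ((PySem.Dict.mk o).get? "symbol").isSome = true ∧
    (pvLook o "symbol" = symbol →
      ((PySem.Dict.mk o).get? "type").isSome = true ∧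
      (if pvLook o "type" ≠ "STOP_MARKET" then ((PySem.Dict.mk o).get? "price").isSome = true
       else ((PySem.Dict.mk o).get? "stopPrice").isSome = true))
instance (open_orders : List (List (String × String))) (symbol : String) : Decidable (Pre_get_limits open_orders symbol) := by unfold Pre_get_limits; infer_instance

def pvWitness_get_limits : (List (List (String × String))) × String :=
  ([[("symbol", "X"), ("type", "LIMIT"), ("price", "1")]], "X")

def Spec_get_limits (open_orders : List (List (String × String))) (symbol : String) (out : String × String) : Prop := out = get_limits_alt open_orders symbol
instance (open_orders : List (List (String × String))) (symbol : String) (out : String × String) : Decidable (Spec_get_limits open_orders symbol out) := by unfold Spec_get_limits; infer_instance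

-- ===== CLAIM (what is proved, stated in full; the proofs are below) =====
def Claim_equal_get_limits : Prop := ∀ (open_orders : List (List (String × String))) (symbol : String), Dom_get_limits open_orders symbol → Pre_get_limits open_orders symbol → Spec_get_limits open_orders symbol (get_limits open_orders symbol)

-- ===== LEMMAS AND PROOFS =====
-- the limit component of A's fold does not depend on the stop component of the initial state, and vice versa
theorem pvFold_fst_indep (symbol : String) (ys : List (List (String × String))) :
    ∀ l s s', (ys.foldl (pvStepA symbol) (l, s)).1 = (ys.foldl (pvStepA symbol) (l, s')).1 := by
  induction ys with
  | nil => intro l s s'; rfl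
  | cons o rest ih =>
    intro l s s'
    simp only [List.foldl_cons, pvStepA]
    split_ifs with h1 h2
    · exact ih _ _ _
    · rfl
    · exact ih _ _ _

theorem pvFold_snd_indep (symbol : String) (ys : List (List (String × String))) :
    ∀ l l' s, (ys.foldl (pvStepA symbol) (l, s)).2 = (ys.foldl (pvStepA symbol) (l', s)).2 := by
  induction ys with
  | nil => intro l l' s; rfl
  | cons o rest ih =>
    intro l l' s
    simp only [List.foldl_cons, pvStepA]
    split_ifs with h1 h2
    · rfl
    · exact ih _ _ _
    · exact ih _ _ _

theorem pvGoB_eq_fold (symbol : String) (rxs : List (List (String × String))) :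
    ∀ l s hl hs, pvGoB symbol rxs l s hl hs =
      ((if hl then l else (rxs.reverse.foldl (pvStepA symbol) (l, s)).1),
       (if hs then s else (rxs.reverse.foldl (pvStepA symbol) (l, s)).2)) := by
  induction rxs with
  | nil => intro l s hl hs; cases hl <;> cases hs <;> rfl
  | cons o rest ih =>
    intro l s hl hs
    have hrev : (o :: rest).reverse = rest.reverse ++ [o] := by simp
    rw [hrev, List.foldl_append]
    simp only [List.foldl_cons, List.foldl_nil]
    show pvGoB symbol (o :: rest) l s hl hs = _
    unfold pvGoB
    by_cases h1 : pvLook o "symbol" = symbol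
    · by_cases h2 : pvLook o "type" ≠ "STOP_MARKET"
      · have hstep : pvStepA symbol (rest.reverse.foldl (pvStepA symbol) (l, s)) o =
            (pvLook o "price", (rest.reverse.foldl (pvStepA symbol) (l, s)).2) := by
          simp [pvStepA, h1, h2]
        rw [hstep]
        cases hl with
        | false =>
          cases hs with
          | true => simp [h1, h2]
          | false =>
            rw [if_pos h1, if_pos h2]
            simp only [Bool.not_false, Bool.false_eq_true, if_false]
            rw [ih]
            simp only [Bool.false_eq_true, if_false, if_true]
            rw [pvFold_snd_indep symbol rest.reverse (pvLook o "price") l s]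
        | true =>
          cases hs with
          | true => simp [h1, h2]
          | false =>
            rw [if_pos h1, if_pos h2]
            simp only [Bool.not_true, Bool.false_eq_true, if_false]
            rw [ih]
            simp
      · have h2' : pvLook o "type" = "STOP_MARKET" := by
          by_contra hc; exact h2 hc
        have hstep : pvStepA symbol (rest.reverse.foldl (pvStepA symbol) (l, s)) o =
            ((rest.reverse.foldl (pvStepA symbol) (l, s)).1, pvLook o "stopPrice") := by
          simp [pvStepA, h1, h2']
        rw [hstep]
        cases hs with
        | false =>
          cases hl with
          | true => simp [h1, h2]
          | false =>
            rw [if_pos h1, if_neg h2]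
            simp only [Bool.not_false, Bool.false_eq_true, if_false]
            rw [ih]
            simp only [Bool.false_eq_true, if_false, if_true]
            rw [pvFold_fst_indep symbol rest.reverse l (pvLook o "stopPrice") s]
        | true =>
          cases hl with
          | true => simp [h1, h2]
          | false =>
            rw [if_pos h1, if_neg h2]
            simp only [Bool.not_true, Bool.false_eq_true, if_false]
            rw [ih]
            simp
    · have hstep : pvStepA symbol (rest.reverse.foldl (pvStepA symbol) (l, s)) o =
          rest.reverse.foldl (pvStepA symbol) (l, s) := by
        simp [pvStepA, h1]
      rw [hstep]
      simp only [h1, if_false]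
      exact ih l s hl hs

-- ===== VERDICT (by name: the statement is the Claim_ definition above) =====
theorem get_limits_spec : Claim_equal_get_limits := by
  intro open_orders symbol _ _
  unfold Spec_get_limits get_limits get_limits_alt
  rw [pvGoB_eq_fold]
  simp
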